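-- pv_equiv track=rewrite | github.com/vradja/leetcode | sliding_window/1052. Grumpy Bookstore Owner.py | maxSatisfied_3
-- ===== SOURCE A (Python) =====
-- def maxSatisfied_3(customers, grumpy, X):
--     window_start, satisfied_customers, max_window_sum, window_sum = 0, 0, 0, 0
--
--     for window_end, (customer_count, is_grumpy) in enumerate(zip(customers, grumpy)):
--         satisfied_customers += customer_count * (not is_grumpy)
--         customers[window_end] = customers[window_end] * is_grumpy
--         window_sum += customer_count * is_grumpy
--
--         if window_end >= X:  # fixed window_size reached
--             window_sum -= customers[window_start]
--             window_start += 1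
--
--         if window_sum > max_window_sum:
--             max_window_sum = window_sum
--
--     return satisfied_customers + max_window_sum
-- ===== SOURCE B (Python) =====
-- def maxSatisfied_3(customers, grumpy, X):
--     # Like A, this mutates customers in place: customers[i] *= grumpy[i] for each paired index.
--     n = min(len(customers), len(grumpy))
--     base = sum(customers[i] for i in range(n) if not grumpy[i])
--     for i in range(n):
--         customers[i] = customers[i] * grumpy[i]
--     prefix = [0] * (n + 1)
--     for i in range(n):
--         prefix[i + 1] = prefix[i] + customers[i]
--     best = 0
--     for e in range(n):
--         lo = min(e + 1, max(0, e - X + 1))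
--         w = prefix[e + 1] - prefix[lo]
--         if w > best:
--             best = w
--     return base + best
-- ===== Notes on version B (the rewrite author's own statement) =====
-- stated objective: alternative
-- what changed: A fuses everything into one sliding-window pass that maintains window_start/window_sum incrementally; B decomposes into separate passes: a base sum over non-grumpy minutes, the in-place gating mutation, a prefix-sum table, and a window pass that reads each capped window [max(0,e-X+1),e] directly as a prefix difference.
import Mathlib
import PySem

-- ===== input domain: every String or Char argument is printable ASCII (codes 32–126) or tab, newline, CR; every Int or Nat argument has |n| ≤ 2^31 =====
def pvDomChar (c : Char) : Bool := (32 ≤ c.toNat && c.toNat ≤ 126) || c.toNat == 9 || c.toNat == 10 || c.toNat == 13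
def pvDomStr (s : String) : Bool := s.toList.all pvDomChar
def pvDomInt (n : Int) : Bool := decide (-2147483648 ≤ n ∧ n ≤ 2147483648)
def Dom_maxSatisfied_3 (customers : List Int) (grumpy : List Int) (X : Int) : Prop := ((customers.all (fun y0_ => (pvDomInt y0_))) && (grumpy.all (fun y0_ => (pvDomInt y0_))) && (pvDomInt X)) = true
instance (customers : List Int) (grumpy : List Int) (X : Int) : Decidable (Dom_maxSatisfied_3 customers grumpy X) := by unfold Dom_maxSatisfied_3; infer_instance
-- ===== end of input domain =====

-- B replaces A's fused sliding-window pass by separate passes (base sum, in-place gating,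
-- prefix sums, capped-window maximum); same return value, and B performs the same in-place
-- mutation of `customers` as A does.


-- ===== PORT A =====
-- loop body of A's single for-loop over enumerate(zip(customers, grumpy));
-- state = (window_start, satisfied_customers, max_window_sum, window_sum, customers).
-- The two pyGetD indices are always in range in A's loop (window_end < len, window_start ≤ window_end),
-- so the default 0 is never used and A is total.
def pvStepA (X : Int) (st : Int × Int × Int × Int × List Int) (p : Int × Int × Int) :
    Int × Int × Int × Int × List Int :=
  let window_start := st.1
  let satisfied := st.2.1
  let max_window_sum := st.2.2.1
  let window_sum := st.2.2.2.1
  let cs := st.2.2.2.2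
  let window_end := p.1
  let customer_count := p.2.1
  let is_grumpy := p.2.2
  let satisfied := satisfied + customer_count * (if is_grumpy = 0 then 1 else 0)
  let cs := PySem.List.pySetD cs window_end (PySem.List.pyGetD cs window_end 0 * is_grumpy)
  let window_sum := window_sum + customer_count * is_grumpy
  let window_sum' := if window_end ≥ X then window_sum - PySem.List.pyGetD cs window_start 0 else window_sum
  let window_start := if window_end ≥ X then window_start + 1 else window_start
  let max_window_sum := if window_sum' > max_window_sum then window_sum' else max_window_sum
  (window_start, satisfied, max_window_sum, window_sum', cs)

def maxSatisfied_3 (customers : List Int) (grumpy : List Int) (X : Int) : Int :=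
  let res := (PySem.List.enumerate (customers.zip grumpy) 0).foldl (pvStepA X)
    ((0 : Int), (0 : Int), (0 : Int), (0 : Int), customers)
  res.2.1 + res.2.2.1

-- ===== PORT B =====
-- B's four loop bodies (base sum; in-place gating; prefix table; capped-window maximum).
def pvStepBase (customers grumpy : List Int) (acc : Int) (i : Int) : Int :=
  if PySem.List.pyGetD grumpy i 0 = 0 then acc + PySem.List.pyGetD customers i 0 else acc

def pvStepMut (grumpy : List Int) (cs : List Int) (i : Int) : List Int :=
  PySem.List.pySetD cs i (PySem.List.pyGetD cs i 0 * PySem.List.pyGetD grumpy i 0)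

def pvStepPre (cs : List Int) (p : List Int) (i : Int) : List Int :=
  PySem.List.pySetD p (i + 1) (PySem.List.pyGetD p i 0 + PySem.List.pyGetD cs i 0)

def pvStepBest (X : Int) (p : List Int) (b : Int) (e : Int) : Int :=
  let lo := min (e + 1) (max 0 (e - X + 1))
  let w := PySem.List.pyGetD p (e + 1) 0 - PySem.List.pyGetD p lo 0
  if w > b then w else b

def maxSatisfied_3_alt (customers : List Int) (grumpy : List Int) (X : Int) : Int :=
  let n : Int := min (customers.length : Int) (grumpy.length : Int)
  let base := (PySem.List.pyRange 0 n 1).foldl (pvStepBase customers grumpy) 0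
  let cs := (PySem.List.pyRange 0 n 1).foldl (pvStepMut grumpy) customers
  let pre := (PySem.List.pyRange 0 n 1).foldl (pvStepPre cs) (List.replicate (n.toNat + 1) 0)
  let best := (PySem.List.pyRange 0 n 1).foldl (pvStepBest X pre) 0
  base + best

-- ===== PRECONDITION & SPEC =====
def Spec_maxSatisfied_3 (customers : List Int) (grumpy : List Int) (X : Int) (out : Int) : Prop := out = maxSatisfied_3_alt customers grumpy X
instance (customers : List Int) (grumpy : List Int) (X : Int) (out : Int) : Decidable (Spec_maxSatisfied_3 customers grumpy X out) := by unfold Spec_maxSatisfied_3; infer_instance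

-- ===== CLAIM (what is proved, stated in full; the proofs are below) =====
def Claim_equal_maxSatisfied_3 : Prop := ∀ (customers : List Int) (grumpy : List Int) (X : Int), Dom_maxSatisfied_3 customers grumpy X → Spec_maxSatisfied_3 customers grumpy X (maxSatisfied_3 customers grumpy X)

-- ===== LEMMAS AND PROOFS =====

-- gated list G[i] = customers[i] * grumpy[i] over the zipped length
def pvG (c g : List Int) : List Int := (c.zip g).map (fun p => p.1 * p.2)
-- contribution of minute i to the base satisfaction
def pvB0 (c g : List Int) : List Int := (c.zip g).map (fun p => if p.2 = 0 then p.1 else 0)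
-- A's window_start after k iterations
def pvS (X : Int) (k : Nat) : Nat := k - min k X.toNat
-- the customers list after k iterations of A's loop
def pvCS (c g : List Int) (k : Nat) : List Int := (pvG c g).take k ++ c.drop k
-- A's window_sum after k iterations
def pvW (c g : List Int) (X : Int) (k : Nat) : Int := (((pvG c g).take k).drop (pvS X k)).sum
-- A's satisfied_customers after k iterations
def pvSat (c g : List Int) (k : Nat) : Int := ((pvB0 c g).take k).sum
-- A's max_window_sum after k iterations
def pvM (c g : List Int) (X : Int) (k : Nat) : Int :=
  (List.range k).foldl (fun m e => if pvW c g X (e+1) > m then pvW c g X (e+1) else m) 0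
-- B's prefix list after k iterations of the prefix loop
def pvPre (c g : List Int) (k : Nat) : List Int :=
  (List.range (k+1)).map (fun j => ((pvG c g).take j).sum) ++ List.replicate ((c.zip g).length - k) 0

theorem pv_enum_getElem? {α : Type} (xs : List α) (s : Int) (k : Nat) :
    (PySem.List.enumerate xs s)[k]? = xs[k]?.map (fun x => (s + k, x)) := by
  induction xs generalizing s k with
  | nil => simp [PySem.List.enumerate]
  | cons x xs ih =>
    cases k with
    | zero => simp [PySem.List.enumerate_cons]
    | succ k =>
      rw [PySem.List.enumerate_cons]
      simp only [List.getElem?_cons_succ, ih]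
      have h : s + 1 + (k : Int) = s + ((k+1 : Nat) : Int) := by push_cast; ring
      rw [h]

theorem pv_enum_take_succ {α : Type} (xs : List α) (k : Nat) (hk : k < xs.length) :
    (PySem.List.enumerate xs 0).take (k+1)
      = (PySem.List.enumerate xs 0).take k ++ [((k : Int), xs[k]'hk)] := by
  rw [List.take_add_one, pv_enum_getElem?]
  simp [List.getElem?_eq_getElem hk]

theorem pvS_le (X : Int) (k : Nat) : pvS X k ≤ k := Nat.sub_le _ _

theorem pvS_succ_of_ge (X : Int) (k : Nat) (h : (k : Int) ≥ X) : pvS X (k+1) = pvS X k + 1 := by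
  unfold pvS; omega

theorem pvS_succ_of_lt (X : Int) (k : Nat) (h : ¬ (k : Int) ≥ X) : pvS X (k+1) = pvS X k := by
  unfold pvS; omega

theorem pv_len_G (c g : List Int) : (pvG c g).length = (c.zip g).length := by
  simp [pvG]

theorem pv_getD_CS_self (c g : List Int) (k : Nat) (hk : k < (c.zip g).length) :
    PySem.List.pyGetD (pvCS c g k) (k : Int) 0 = c.getD k 0 := by
  have hz := List.length_zip (l₁ := c) (l₂ := g)
  have hG := pv_len_G c g
  have hc : k < c.length := by omega
  have hl : ((pvG c g).take k).length = k := by simp; omega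
  rw [PySem.List.pyGetD_natCast]
  unfold pvCS
  rw [List.getD_eq_getElem _ _ (by simp; omega), List.getElem_append_right (by omega),
      List.getD_eq_getElem _ _ hc]
  simp [hl]

theorem pv_set_CS (c g : List Int) (k : Nat) (hk : k < (c.zip g).length) :
    PySem.List.pySetD (pvCS c g k) (k : Int)
        (c.getD k 0 * g.getD k 0)
      = pvCS c g (k+1) := by
  have hz := List.length_zip (l₁ := c) (l₂ := g)
  have hG := pv_len_G c g
  have hc : k < c.length := by omega
  have hg : k < g.length := by omega
  have hkG : k < (pvG c g).length := by omega
  have hl : ((pvG c g).take k).length = k := by simp; omega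
  have hv : c.getD k 0 * g.getD k 0 = (pvG c g)[k] := by
    simp [pvG, List.getElem?_eq_getElem hc, List.getElem?_eq_getElem hg, List.getElem_zip]
  rw [PySem.List.pySetD_natCast, hv]
  unfold pvCS
  rw [List.set_append, List.drop_eq_getElem_cons hc, List.take_add_one,
      List.getElem?_eq_getElem hkG]
  simp only [hl, lt_self_iff_false, Nat.sub_self, List.set_cons_zero,
    Option.toList_some, List.append_assoc, List.singleton_append]
  simp

theorem pv_getD_CS_G (c g : List Int) (j k : Nat) (hj : j ≤ k) (hk : k < (c.zip g).length) :
    PySem.List.pyGetD (pvCS c g (k+1)) (j : Int) 0 = (pvG c g).getD j 0 := by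
  have hz := List.length_zip (l₁ := c) (l₂ := g)
  have hG := pv_len_G c g
  have hjG : j < (pvG c g).length := by omega
  have hl : ((pvG c g).take (k+1)).length = k+1 := by simp; omega
  rw [PySem.List.pyGetD_natCast]
  unfold pvCS
  rw [List.getD_eq_getElem _ _ (by simp; omega), List.getElem_append_left (by omega),
      List.getElem_take, List.getD_eq_getElem _ _ hjG]

theorem pv_W_add (c g : List Int) (X : Int) (k : Nat) (hk : k < (c.zip g).length) :
    pvW c g X k + (pvG c g).getD k 0
      = (((pvG c g).take (k+1)).drop (pvS X k)).sum := by
  have hG := pv_len_G c g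
  have hkG : k < (pvG c g).length := by omega
  unfold pvW
  rw [List.take_add_one, List.getElem?_eq_getElem hkG,
      List.drop_append_of_le_length (by simp; have := pvS_le X k; omega)]
  simp [List.getElem?_eq_getElem hkG]

theorem pv_W_succ_ge (c g : List Int) (X : Int) (k : Nat) (hk : k < (c.zip g).length)
    (h : (k : Int) ≥ X) :
    (((pvG c g).take (k+1)).drop (pvS X k)).sum - (pvG c g).getD (pvS X k) 0
      = pvW c g X (k+1) := by
  have hG := pv_len_G c g
  have hs := pvS_le X k
  have hsl : pvS X k < ((pvG c g).take (k+1)).length := by simp; omega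
  have hsG : pvS X k < (pvG c g).length := by omega
  rw [List.drop_eq_getElem_cons hsl, List.getElem_take]
  unfold pvW
  rw [pvS_succ_of_ge X k h]
  simp [List.getElem?_eq_getElem hsG]

theorem pv_W_succ_lt (c g : List Int) (X : Int) (k : Nat) (h : ¬ (k : Int) ≥ X) :
    (((pvG c g).take (k+1)).drop (pvS X k)).sum = pvW c g X (k+1) := by
  unfold pvW
  rw [pvS_succ_of_lt X k h]

theorem pv_Sat_succ (c g : List Int) (k : Nat) (hk : k < (c.zip g).length) :
    pvSat c g (k+1) = pvSat c g k
      + (if ((c.zip g).getD k (0,0)).2 = 0 then ((c.zip g).getD k (0,0)).1 else 0) := by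
  have hB : k < (pvB0 c g).length := by simpa [pvB0, List.length_zip] using hk
  unfold pvSat
  rw [List.take_add_one, List.getElem?_eq_getElem hB]
  simp [pvB0, List.getElem?_eq_getElem hk, List.getElem_zip]

theorem pv_M_succ (c g : List Int) (X : Int) (k : Nat) :
    pvM c g X (k+1) = if pvW c g X (k+1) > pvM c g X k then pvW c g X (k+1) else pvM c g X k := by
  simp [pvM, List.range_succ]

-- the A-loop invariant
theorem pv_loopA (c g : List Int) (X : Int) (k : Nat) (hk : k ≤ (c.zip g).length) :
    ((PySem.List.enumerate (c.zip g) 0).take k).foldl (pvStepA X) ((0:Int), (0:Int), (0:Int), (0:Int), c)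
      = (((pvS X k : Nat) : Int), pvSat c g k, pvM c g X k, pvW c g X k, pvCS c g k) := by
  induction k with
  | zero => simp [pvS, pvSat, pvM, pvW, pvCS]
  | succ k ih =>
    have hz := List.length_zip (l₁ := c) (l₂ := g)
    have hk' : k < (c.zip g).length := by omega
    have hc : k < c.length := by omega
    have hg : k < g.length := by omega
    rw [pv_enum_take_succ _ _ hk', List.foldl_append, ih (by omega)]
    simp only [List.foldl_cons, List.foldl_nil, pvStepA]
    have hzk : (c.zip g)[k]'hk' = (c.getD k 0, g.getD k 0) := by
      rw [List.getElem_zip, List.getD_eq_getElem c 0 hc, List.getD_eq_getElem g 0 hg]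
    rw [hzk]
    simp only [pv_getD_CS_self c g k hk', pv_set_CS c g k hk']
    have hGk : c.getD k 0 * g.getD k 0 = (pvG c g).getD k 0 := by
      simp [pvG, List.getElem?_eq_getElem hk', hzk]
    rw [hGk]
    have hW : (if (k : Int) ≥ X then
          pvW c g X k + (pvG c g).getD k 0
            - PySem.List.pyGetD (pvCS c g (k+1)) ((pvS X k : Nat) : Int) 0
        else pvW c g X k + (pvG c g).getD k 0) = pvW c g X (k+1) := by
      by_cases hcase : (k : Int) ≥ X
      · rw [if_pos hcase, pv_getD_CS_G c g (pvS X k) k (pvS_le X k) hk', pv_W_add c g X k hk']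
        exact pv_W_succ_ge c g X k hk' hcase
      · rw [if_neg hcase, pv_W_add c g X k hk']
        exact pv_W_succ_lt c g X k hcase
    rw [hW, ← pv_M_succ c g X k]
    have hzD : (c.zip g).getD k (0, 0) = (c.getD k 0, g.getD k 0) := by
      rw [List.getD_eq_getElem _ _ hk', hzk]
    simp only [Prod.mk.injEq]
    refine ⟨?_, ?_, trivial⟩
    · by_cases hcase : (k : Int) ≥ X
      · rw [if_pos hcase, pvS_succ_of_ge X k hcase]; push_cast; ring
      · rw [if_neg hcase, pvS_succ_of_lt X k hcase]
    · rw [pv_Sat_succ c g k hk', hzD]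
      by_cases hgs : g.getD k 0 = 0 <;> simp

theorem pv_A_eq (c g : List Int) (X : Int) :
    maxSatisfied_3 c g X = pvSat c g (c.zip g).length + pvM c g X (c.zip g).length := by
  have hlen : (PySem.List.enumerate (c.zip g) 0).take (c.zip g).length
      = PySem.List.enumerate (c.zip g) 0 := by
    conv_lhs => rw [← PySem.List.length_enumerate (c.zip g) 0]
    exact List.take_length
  unfold maxSatisfied_3
  rw [← hlen, pv_loopA c g X _ (le_refl _)]

-- B side
theorem pv_sum_drop (l : List Int) (s : Nat) : (l.drop s).sum = l.sum - (l.take s).sum := by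
  have h := congrArg List.sum (List.take_append_drop s l)
  rw [List.sum_append] at h
  omega

theorem pv_base_eq (c g : List Int) (k : Nat) (hk : k ≤ (c.zip g).length) :
    (PySem.List.pyRange 0 (k : Int) 1).foldl (pvStepBase c g) 0 = pvSat c g k := by
  induction k with
  | zero => simp [pvSat, PySem.List.pyRange_one_eq_nil]
  | succ k ih =>
    have hz := List.length_zip (l₁ := c) (l₂ := g)
    have hk' : k < (c.zip g).length := by omega
    have hkk : ((k + 1 : Nat) : Int) = (k : Int) + 1 := by push_cast; ring
    rw [hkk, PySem.List.pyRange_one_succ_right (by positivity), List.foldl_append,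
        ih (by omega)]
    simp only [List.foldl_cons, List.foldl_nil, pvStepBase, PySem.List.pyGetD_natCast]
    have hzD : (c.zip g).getD k (0, 0) = (c.getD k 0, g.getD k 0) := by
      rw [List.getD_eq_getElem _ _ hk', List.getElem_zip,
          List.getD_eq_getElem c 0 (by omega), List.getD_eq_getElem g 0 (by omega)]
    rw [pv_Sat_succ c g k hk', hzD]
    simp only [List.getD_eq_getElem g 0 (show k < g.length by omega),
      List.getD_eq_getElem c 0 (show k < c.length by omega)]
    split_ifs <;> simp

theorem pv_mut_eq (c g : List Int) (k : Nat) (hk : k ≤ (c.zip g).length) :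
    (PySem.List.pyRange 0 (k : Int) 1).foldl (pvStepMut g) c = pvCS c g k := by
  induction k with
  | zero => simp [pvCS, PySem.List.pyRange_one_eq_nil]
  | succ k ih =>
    have hz := List.length_zip (l₁ := c) (l₂ := g)
    have hk' : k < (c.zip g).length := by omega
    have hkk : ((k + 1 : Nat) : Int) = (k : Int) + 1 := by push_cast; ring
    rw [hkk, PySem.List.pyRange_one_succ_right (by positivity), List.foldl_append,
        ih (by omega)]
    simp only [List.foldl_cons, List.foldl_nil, pvStepMut]
    rw [pv_getD_CS_self c g k hk', PySem.List.pyGetD_natCast]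
    exact pv_set_CS c g k hk'

theorem pv_pre_eq (c g : List Int) (k : Nat) (hk : k ≤ (c.zip g).length) :
    (PySem.List.pyRange 0 (k : Int) 1).foldl (pvStepPre (pvCS c g (c.zip g).length))
        (List.replicate ((c.zip g).length + 1) 0) = pvPre c g k := by
  induction k with
  | zero => simp [pvPre, List.replicate_succ, PySem.List.pyRange_one_eq_nil]
  | succ k ih =>
    have hz := List.length_zip (l₁ := c) (l₂ := g)
    have hG := pv_len_G c g
    have hk' : k < (c.zip g).length := by omega
    have hkG : k < (pvG c g).length := by omega
    have hkk : ((k + 1 : Nat) : Int) = (k : Int) + 1 := by push_cast; ring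
    rw [hkk, PySem.List.pyRange_one_succ_right (by positivity), List.foldl_append, ih (by omega)]
    simp only [List.foldl_cons, List.foldl_nil, pvStepPre]
    have hcs : PySem.List.pyGetD (pvCS c g (c.zip g).length) (k : Int) 0 = (pvG c g).getD k 0 := by
      rw [show (c.zip g).length = ((c.zip g).length - 1) + 1 by omega]
      exact pv_getD_CS_G c g k ((c.zip g).length - 1) (by omega) (by omega)
    have hget : PySem.List.pyGetD (pvPre c g k) (k : Int) 0 = ((pvG c g).take k).sum := by
      rw [PySem.List.pyGetD_natCast]
      unfold pvPre
      rw [List.getD_eq_getElem _ _ (by simp; omega), List.getElem_append_left (by simp)]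
      simp
    rw [hget, hcs, show (k : Int) + 1 = ((k + 1 : Nat) : Int) by push_cast; ring,
        PySem.List.pySetD_natCast]
    have hsum : ((pvG c g).take k).sum + (pvG c g).getD k 0 = ((pvG c g).take (k+1)).sum := by
      rw [List.sum_take_succ _ _ hkG, List.getD_eq_getElem _ _ hkG]
    rw [hsum]
    unfold pvPre
    have hrep : List.replicate ((c.zip g).length - k) (0:Int)
        = 0 :: List.replicate ((c.zip g).length - (k+1)) 0 := by
      rw [show (c.zip g).length - k = ((c.zip g).length - (k+1)) + 1 by omega,
          List.replicate_succ]
    rw [hrep, List.set_append]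
    simp [List.range_succ]

theorem pv_pre_getD (c g : List Int) (j : Nat) (hj : j ≤ (c.zip g).length) :
    PySem.List.pyGetD (pvPre c g (c.zip g).length) (j : Int) 0 = ((pvG c g).take j).sum := by
  unfold pvPre
  simp only [Nat.sub_self, List.replicate_zero, List.append_nil]
  rw [PySem.List.pyGetD_natCast, List.getD_eq_getElem _ _
    (by have hz := List.length_zip (l₁ := c) (l₂ := g); simp; omega)]
  simp

theorem pv_best_eq (c g : List Int) (X : Int) :
    (PySem.List.pyRange 0 ((c.zip g).length : Int) 1).foldl
        (pvStepBest X (pvPre c g (c.zip g).length)) 0 = pvM c g X (c.zip g).length := by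
  rw [PySem.List.pyRange_one 0 _]
  simp only [zero_add, sub_zero, Int.toNat_natCast]
  rw [List.foldl_map]
  unfold pvM
  apply PySem.List.foldl_congr_mem
  intro acc e he
  have he' : e < (c.zip g).length := List.mem_range.mp he
  simp only [pvStepBest]
  have hlo : min ((e : Int) + 1) (max 0 ((e : Int) - X + 1)) = ((pvS X (e+1) : Nat) : Int) := by
    unfold pvS; omega
  rw [hlo, show (e : Int) + 1 = ((e + 1 : Nat) : Int) by push_cast; ring,
      pv_pre_getD c g (e+1) (by omega),
      pv_pre_getD c g (pvS X (e+1)) (le_trans (pvS_le X (e+1)) (by omega))]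
  have hw : ((pvG c g).take (e+1)).sum - ((pvG c g).take (pvS X (e+1))).sum = pvW c g X (e+1) := by
    unfold pvW
    rw [pv_sum_drop ((pvG c g).take (e+1)) (pvS X (e+1)), List.take_take,
        Nat.min_eq_left (pvS_le X (e+1))]
  rw [hw]

theorem pv_B_eq (c g : List Int) (X : Int) :
    maxSatisfied_3_alt c g X = pvSat c g (c.zip g).length + pvM c g X (c.zip g).length := by
  have hz := List.length_zip (l₁ := c) (l₂ := g)
  have hn : min ((c.length : Int)) ((g.length : Int)) = (((c.zip g).length : Nat) : Int) := by
    rw [hz, Nat.cast_min]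
  unfold maxSatisfied_3_alt
  rw [hn]
  simp only [Int.toNat_natCast]
  rw [pv_base_eq c g _ (le_refl _), pv_mut_eq c g _ (le_refl _),
      pv_pre_eq c g _ (le_refl _), pv_best_eq c g X]

-- ===== VERDICT (by name: the statement is the Claim_ definition above) =====
theorem maxSatisfied_3_spec : Claim_equal_maxSatisfied_3 := by
  intro c g X _
  unfold Spec_maxSatisfied_3
  rw [pv_A_eq, pv_B_eq]
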